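-- pv_equiv track=rewrite | github.com/bnp800/swade_compendium_chn | automation/format_converter/converter.py | _assign_placeholders_to_paragraphs
-- ===== SOURCE A (Python) =====
-- from typing import Dict, List, Optional, Tuple, Any
--
-- def _assign_placeholders_to_paragraphs(source_paragraphs: List[str],
--                                        placeholder_map: Dict) -> Dict[int, List[str]]:
--     """将占位符分配到对应的段落"""
--     assignments = {}
--
--     for placeholder, link_data in placeholder_map.items():
--         # 查找占位符在哪个段落
--         for i, para in enumerate(source_paragraphs):
--             if placeholder in para:
--                 if i not in assignments:
--                     assignments[i] = []
--                 assignments[i].append(placeholder)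
--                 break
--
--     return assignments
-- ===== SOURCE B (Python) =====
-- def _assign_placeholders_to_paragraphs(source_paragraphs, placeholder_map):
--     """Single sweep over the paragraphs: every placeholder is tested only until its
--     first containing paragraph is found (early exit once all are placed), then the
--     results are grouped back in placeholder-map order."""
--     first_idx = {}
--     remaining = list(placeholder_map)
--     for i, para in enumerate(source_paragraphs):
--         if not remaining:
--             break
--         still = []
--         for p in remaining:
--             if p in para:
--                 first_idx[p] = i
--             else:
--                 still.append(p)
--         remaining = still
--     assignments = {}
--     for p in placeholder_map:
--         if p in first_idx:
--             assignments.setdefault(first_idx[p], []).append(p)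
--     return assignments
-- ===== Notes on version B (the rewrite author's own statement) =====
-- stated objective: alternative
-- what changed: Replaced the placeholder-major nested scan (restarting from paragraph 0 for every placeholder) by a single paragraph-major sweep that keeps the set of still-unplaced placeholders, drops each placeholder as soon as its first paragraph is found, stops early once all are placed, and then groups the recorded indices back in map order.
import Mathlib
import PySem

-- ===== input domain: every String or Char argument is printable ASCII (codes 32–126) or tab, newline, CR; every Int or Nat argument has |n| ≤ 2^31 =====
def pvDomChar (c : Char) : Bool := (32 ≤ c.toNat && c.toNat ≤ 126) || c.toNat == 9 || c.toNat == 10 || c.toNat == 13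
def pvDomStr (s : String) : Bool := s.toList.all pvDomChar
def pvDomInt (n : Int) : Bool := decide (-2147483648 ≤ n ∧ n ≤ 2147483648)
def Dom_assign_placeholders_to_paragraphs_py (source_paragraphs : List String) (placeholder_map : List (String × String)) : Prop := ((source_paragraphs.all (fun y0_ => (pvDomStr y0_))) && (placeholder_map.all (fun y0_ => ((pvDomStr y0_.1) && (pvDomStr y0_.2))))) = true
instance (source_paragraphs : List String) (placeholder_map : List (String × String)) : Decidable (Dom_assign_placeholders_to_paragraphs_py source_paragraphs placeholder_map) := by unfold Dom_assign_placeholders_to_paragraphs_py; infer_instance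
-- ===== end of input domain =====

-- B replaces A's placeholder-major nested scan by a single paragraph-major sweep over the
-- paragraphs with a shrinking list of unplaced placeholders, then groups in map order
-- (objective: alternative algorithm of similar cost).


-- ===== PORT A =====
-- A's inner loop: 'for i, para in enumerate(source_paragraphs): if placeholder in para: …; break'
def aInner (placeholder : String) (assignments : PySem.Dict Int (List String)) :
    List (Int × String) → PySem.Dict Int (List String)
  | [] => assignments
  | (i, para) :: rest =>
    if PySem.Str.isIn placeholder para then
      (if assignments.contains i then assignments else assignments.insert i []).modify i []
        (fun v => v ++ [placeholder])
    else aInner placeholder assignments rest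

def assign_placeholders_to_paragraphs_py (source_paragraphs : List String) (placeholder_map : List (String × String)) : List (Int × List String) :=
  (placeholder_map.foldl
    (fun assignments pl => aInner pl.1 assignments (PySem.List.enumerate source_paragraphs 0))
    PySem.Dict.empty).items

-- ===== PORT B =====
-- B's sweep: 'for i, para in enumerate(source_paragraphs): if not remaining: break;
--   for p in remaining: if p in para: first_idx[p] = i else: still.append(p); remaining = still'
def bSweep (i : Int) (first_idx : PySem.Dict String Int) (remaining : List String) :
    List String → PySem.Dict String Int
  | [] => first_idx
  | para :: rest =>
    if remaining.isEmpty then first_idx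
    else
      let st := remaining.foldl
        (fun (acc : PySem.Dict String Int × List String) p =>
          if PySem.Str.isIn p para then (acc.1.insert p i, acc.2) else (acc.1, acc.2 ++ [p]))
        (first_idx, [])
      bSweep (i + 1) st.1 st.2 rest

-- 'first_idx' after the sweep (B's local variable)
def bFirstIdx (source_paragraphs : List String) (placeholder_map : List (String × String)) : PySem.Dict String Int :=
  bSweep 0 PySem.Dict.empty (placeholder_map.map (fun pl => pl.1)) source_paragraphs

def assign_placeholders_to_paragraphs_py_alt (source_paragraphs : List String) (placeholder_map : List (String × String)) : List (Int × List String) :=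
  (placeholder_map.foldl
    (fun assignments pl =>
      match (bFirstIdx source_paragraphs placeholder_map).get? pl.1 with
      | some i => (assignments.setdefault i []).modify i [] (fun v => v ++ [pl.1])
      | none => assignments)
    PySem.Dict.empty).items

-- ===== PRECONDITION & SPEC =====
def Spec_assign_placeholders_to_paragraphs_py (source_paragraphs : List String) (placeholder_map : List (String × String)) (out : List (Int × List String)) : Prop := out = assign_placeholders_to_paragraphs_py_alt source_paragraphs placeholder_map
instance (source_paragraphs : List String) (placeholder_map : List (String × String)) (out : List (Int × List String)) : Decidable (Spec_assign_placeholders_to_paragraphs_py source_paragraphs placeholder_map out) := by unfold Spec_assign_placeholders_to_paragraphs_py; infer_instance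

-- ===== CLAIM (what is proved, stated in full; the proofs are below) =====
def Claim_equal_assign_placeholders_to_paragraphs_py : Prop := ∀ (source_paragraphs : List String) (placeholder_map : List (String × String)), Dom_assign_placeholders_to_paragraphs_py source_paragraphs placeholder_map → Spec_assign_placeholders_to_paragraphs_py source_paragraphs placeholder_map (assign_placeholders_to_paragraphs_py source_paragraphs placeholder_map)

-- ===== LEMMAS AND PROOFS =====

-- index (as Int) of the first paragraph containing p, if any
def firstIdx? (p : String) : List String → Option Int
  | [] => none
  | para :: rest =>
    if PySem.Str.isIn p para then some 0 else (firstIdx? p rest).map (fun k => k + 1)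

lemma firstIdx?_cons (p para : String) (rest : List String) :
    firstIdx? p (para :: rest) =
      if PySem.Str.isIn p para then some 0 else (firstIdx? p rest).map (fun k => k + 1) := rfl

-- the per-placeholder dict update both ports perform
def stepD (d : PySem.Dict Int (List String)) (i : Int) (p : String) : PySem.Dict Int (List String) :=
  (if d.contains i then d else d.insert i []).modify i [] (fun v => v ++ [p])

lemma setdefault_eq (d : PySem.Dict Int (List String)) (i : Int) :
    d.setdefault i [] = if d.contains i then d else d.insert i [] := by
  unfold PySem.Dict.setdefault
  by_cases h : d.contains i = true
  · rw [if_pos h, if_pos h]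
  · rw [if_neg h, if_neg h]
    exact congrArg PySem.Dict.mk
      (PySem.Dict.items_insert_of_not_contains d ([] : List String)
        ((Bool.not_eq_true _) ▸ h)).symm

lemma aInner_cons (p : String) (d : PySem.Dict Int (List String)) (i : Int) (para : String)
    (rest : List (Int × String)) :
    aInner p d ((i, para) :: rest) =
      if PySem.Str.isIn p para then
        (if d.contains i then d else d.insert i []).modify i [] (fun v => v ++ [p])
      else aInner p d rest := rfl

lemma aInner_eq (p : String) (paras : List String) :
    ∀ (s : Int) (d : PySem.Dict Int (List String)),
      aInner p d (PySem.List.enumerate paras s) =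
        match firstIdx? p paras with
        | none => d
        | some k => stepD d (s + k) p := by
  induction paras with
  | nil => intro s d; rfl
  | cons para rest ih =>
    intro s d
    rw [PySem.List.enumerate_cons, aInner_cons, firstIdx?_cons]
    by_cases h : PySem.Str.isIn p para = true
    · rw [if_pos h, if_pos h]
      show stepD d s p = stepD d (s + 0) p
      rw [add_zero]
    · rw [if_neg h, if_neg h, ih (s + 1) d]
      cases hk : firstIdx? p rest with
      | none => rfl
      | some k =>
        show stepD d (s + 1 + k) p = stepD d (s + (k + 1)) p
        rw [show s + 1 + k = s + (k + 1) from by ring]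

lemma fold_pair (c : String → Bool) (i : Int) :
    ∀ (l : List String) (d : PySem.Dict String Int) (acc : List String),
      l.foldl
        (fun (ac : PySem.Dict String Int × List String) p =>
          if c p then (ac.1.insert p i, ac.2) else (ac.1, ac.2 ++ [p])) (d, acc)
      = (l.foldl (fun d p => if c p then d.insert p i else d) d,
         acc ++ l.filter (fun p => !c p)) := by
  intro l
  induction l with
  | nil => intro d acc; simp only [List.foldl_nil, List.filter_nil, List.append_nil]
  | cons r rest ih =>
    intro d acc
    simp only [List.foldl_cons, List.filter_cons]
    cases h : c r with
    | true =>
      rw [if_pos rfl, if_pos rfl,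
          if_neg (show ¬((!true) = true) from by decide), ih]
    | false =>
      rw [if_neg (show ¬((false : Bool) = true) from by decide),
          if_neg (show ¬((false : Bool) = true) from by decide),
          if_pos (show (!false) = true from rfl), ih]
      simp

lemma get?_foldl_insert (c : String → Bool) (i : Int) (q : String) :
    ∀ (l : List String) (d : PySem.Dict String Int),
      (l.foldl (fun d p => if c p then d.insert p i else d) d).get? q
      = if q ∈ l ∧ c q = true then some i else d.get? q := by
  intro l
  induction l with
  | nil =>
    intro d
    rw [List.foldl_nil, if_neg (by rintro ⟨hm, _⟩; exact List.not_mem_nil hm)]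
  | cons r rest ih =>
    intro d
    rw [List.foldl_cons, ih]
    by_cases hq : q ∈ rest ∧ c q = true
    · rw [if_pos hq, if_pos ⟨List.mem_cons_of_mem _ hq.1, hq.2⟩]
    · rw [if_neg hq]
      by_cases hr : c r = true
      · rw [if_pos hr, PySem.Dict.get?_insert]
        by_cases hqr : q = r
        · subst hqr
          rw [if_pos rfl, if_pos ⟨List.mem_cons_self, hr⟩]
        · rw [if_neg hqr,
              if_neg (by
                rintro ⟨hm, hcq⟩
                rcases List.mem_cons.mp hm with h1 | h1
                · exact hqr h1
                · exact hq ⟨h1, hcq⟩)]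
      · rw [if_neg hr,
            if_neg (by
              rintro ⟨hm, hcq⟩
              rcases List.mem_cons.mp hm with h1 | h1
              · exact hr (h1 ▸ hcq)
              · exact hq ⟨h1, hcq⟩)]

lemma bSweep_not_mem (q : String) (paras : List String) :
    ∀ (i : Int) (d : PySem.Dict String Int) (remaining : List String),
      q ∉ remaining → (bSweep i d remaining paras).get? q = d.get? q := by
  induction paras with
  | nil => intro i d remaining _; rfl
  | cons para rest ih =>
    intro i d remaining hq
    simp only [bSweep]
    by_cases he : remaining.isEmpty = true
    · rw [if_pos he]
    · rw [if_neg he, fold_pair]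
      dsimp only
      rw [List.nil_append,
          ih (i + 1) _ _ (fun hm => hq (List.mem_of_mem_filter hm)),
          get?_foldl_insert, if_neg (fun hc => hq hc.1)]

lemma bSweep_get (q : String) (paras : List String) :
    ∀ (i : Int) (d : PySem.Dict String Int) (remaining : List String),
      q ∈ remaining →
      (bSweep i d remaining paras).get? q =
        match firstIdx? q paras with
        | some k => some (i + k)
        | none => d.get? q := by
  induction paras with
  | nil => intro i d remaining _; rfl
  | cons para rest ih =>
    intro i d remaining hq
    simp only [bSweep]
    by_cases he : remaining.isEmpty = true
    · exact absurd (List.isEmpty_iff.mp he ▸ hq) (List.not_mem_nil)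
    · rw [if_neg he, fold_pair]
      dsimp only
      rw [List.nil_append, firstIdx?_cons]
      cases h : PySem.Str.isIn q para with
      | true =>
        have hnot : q ∉ remaining.filter (fun p => !(PySem.Str.isIn p para)) := by
          intro hm
          have hb := List.of_mem_filter hm
          rw [h] at hb
          simp at hb
        rw [bSweep_not_mem q rest (i + 1) _ _ hnot,
            get?_foldl_insert, if_pos ⟨hq, h⟩, if_pos rfl]
        show some i = some (i + 0)
        rw [add_zero]
      | false =>
        have hmem : q ∈ remaining.filter (fun p => !(PySem.Str.isIn p para)) :=
          List.mem_filter.mpr ⟨hq, by rw [h]; rfl⟩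
        rw [ih (i + 1) _ _ hmem, if_neg (show ¬((false : Bool) = true) from by decide)]
        cases hk : firstIdx? q rest with
        | none =>
          show (List.foldl _ d remaining).get? q = d.get? q
          rw [get?_foldl_insert,
              if_neg (by rintro ⟨_, hcq⟩; rw [h] at hcq; exact absurd hcq (by decide))]
        | some k =>
          show some (i + 1 + k) = some (i + (k + 1))
          rw [show i + 1 + k = i + (k + 1) from by ring]

-- ===== VERDICT (by name: the statement is the Claim_ definition above) =====
theorem assign_placeholders_to_paragraphs_py_spec : Claim_equal_assign_placeholders_to_paragraphs_py := by
  intro paras pmap _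
  unfold Spec_assign_placeholders_to_paragraphs_py
  unfold assign_placeholders_to_paragraphs_py assign_placeholders_to_paragraphs_py_alt
  congr 1
  apply PySem.List.foldl_congr_mem
  intro acc pl hpl
  rw [aInner_eq pl.1 paras 0 acc]
  simp only [bFirstIdx]
  rw [bSweep_get pl.1 paras 0 PySem.Dict.empty _ (List.mem_map.mpr ⟨pl, hpl, rfl⟩)]
  cases hk : firstIdx? pl.1 paras with
  | none => rfl
  | some k =>
    show stepD acc (0 + k) pl.1 = (acc.setdefault (0 + k) []).modify (0 + k) [] (fun v => v ++ [pl.1])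
    rw [setdefault_eq]
    rfl
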